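-- pv_equiv track=rewrite | github.com/pypi-data/pypi-mirror-403 | packages/just-bash/just_bash-0.1.9.tar.gz/just_bash-0.1.9/src/just_bash/commands/expand/expand.py | _unexpand_line
-- ===== SOURCE A (Python) =====
-- def _unexpand_line(line: str, tab_width: int, all_spaces: bool) -> str:
--     """Unexpand spaces in a single line."""
--     if not line:
--         return line
--
--     result = []
--     space_count = 0
--     column = 0
--     in_leading = True
--
--     for char in line:
--         if char == " ":
--             space_count += 1
--             column += 1
--
--             # Check if we've reached a tab stop
--             if column % tab_width == 0:
--                 if in_leading or all_spaces:
--                     result.append("\t")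
--                 else:
--                     result.append(" " * space_count)
--                 space_count = 0
--         else:
--             # Flush pending spaces
--             if space_count > 0:
--                 result.append(" " * space_count)
--                 space_count = 0
--             result.append(char)
--             column += 1
--             if char != " ":
--                 in_leading = False
--
--     # Flush any remaining spaces
--     if space_count > 0:
--         result.append(" " * space_count)
--
--     return "".join(result)
-- ===== SOURCE B (Python) =====
-- def _unexpand_line(line: str, tab_width: int, all_spaces: bool) -> str:
--     """Unexpand spaces by scanning maximal runs instead of a per-char state machine."""
--     if not line:
--         return line
--     w = abs(tab_width)
--     out = []
--     i = 0
--     n = len(line)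
--     while i < n:
--         j = i
--         if line[i] == " ":
--             while j < n and line[j] == " ":
--                 j += 1
--             k = j - i
--             if (i == 0 or all_spaces):
--                 t = j // w - i // w  # tab stops strictly inside (i, j]
--                 if t > 0:
--                     out.append("\t" * t + " " * (j - (j // w) * w))
--                 else:
--                     out.append(" " * k)
--             else:
--                 out.append(" " * k)
--         else:
--             while j < n and line[j] != " ":
--                 j += 1
--             out.append(line[i:j])
--         i = j
--     return "".join(out)
-- ===== Notes on version B (the rewrite author's own statement) =====
-- stated objective: alternative
-- what changed: Replaced A's per-character state machine (space counter, column, leading flag, tab-stop check on every space) by a single scan over maximal runs of spaces/non-spaces that emits each run at once, with a closed-form tab count per convertible space run (j//w - i//w).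
-- crash fix: On tab_width == 0 with a space in the line A raises ZeroDivisionError; when no space run is convertible (line not starting with a space and all_spaces false) B returns the line with its spaces untouched. — e.g. on _unexpand_line("x y", 0, false): A raises ZeroDivisionError, B returns "x y"
import Mathlib
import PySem

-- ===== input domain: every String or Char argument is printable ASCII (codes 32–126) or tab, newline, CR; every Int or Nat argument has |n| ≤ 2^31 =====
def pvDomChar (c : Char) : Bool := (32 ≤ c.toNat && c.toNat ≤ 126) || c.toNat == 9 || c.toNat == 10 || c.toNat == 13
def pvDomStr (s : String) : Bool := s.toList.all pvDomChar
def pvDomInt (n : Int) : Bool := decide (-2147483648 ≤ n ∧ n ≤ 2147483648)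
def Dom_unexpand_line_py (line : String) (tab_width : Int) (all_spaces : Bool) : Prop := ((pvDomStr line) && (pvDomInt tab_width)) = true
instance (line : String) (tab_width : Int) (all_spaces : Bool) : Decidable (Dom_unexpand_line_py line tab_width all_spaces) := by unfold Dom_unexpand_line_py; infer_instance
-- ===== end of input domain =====

-- B replaces A's per-character state machine by a scan over maximal runs of spaces/non-spaces
-- with a closed-form tab count per run (objective: alternative decomposition, same cost).

-- ===== PORT A =====
-- the loop body of A (space_count/column are Python ints that stay ≥ 0, kept as Nat;
-- the tab-stop test 'column % tab_width == 0' uses Python's mod via PySem.Int.mod)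
def pvAStep (tab_width : Int) (all_spaces : Bool)
    (st : List Char × Nat × Nat × Bool) (c : Char) : List Char × Nat × Nat × Bool :=
  let (res, sc, col, lead) := st
  if c = ' ' then
    let sc := sc + 1
    let col := col + 1
    if PySem.Int.mod (col : Int) tab_width = 0 then
      if lead || all_spaces then (res ++ ['\t'], 0, col, lead)
      else (res ++ List.replicate sc ' ', 0, col, lead)
    else (res, sc, col, lead)
  else
    let res := if sc > 0 then res ++ List.replicate sc ' ' else res
    (res ++ [c], 0, col + 1, if c ≠ ' ' then false else lead)

def unexpand_line_py (line : String) (tab_width : Int) (all_spaces : Bool) : String :=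
  if line.toList = [] then line
  else
    let st := line.toList.foldl (pvAStep tab_width all_spaces) ([], 0, 0, true)
    String.mk (if st.2.1 > 0 then st.1 ++ List.replicate st.2.1 ' ' else st.1)

-- ===== PORT B =====
-- run scanner of Source B: consumes one maximal run per step; i is the current 0-based column.
-- The while loop is ported with a fuel parameter (initially len(line)); each iteration consumes
-- at least one character, so fuel = length is always enough.
def pvBRuns (w : Int) (all_spaces : Bool) : Nat → List Char → Nat → List Char
  | 0, _, _ => []
  | _ + 1, [], _ => []
  | fuel + 1, c :: cs, i =>
    if c = ' ' then
      let sp := List.takeWhile (· = ' ') cs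
      let rest := List.dropWhile (· = ' ') cs
      let j := i + 1 + sp.length
      let piece :=
        if i = 0 ∨ all_spaces = true then
          let t := PySem.Int.floordiv (j : Int) w - PySem.Int.floordiv (i : Int) w
          if 0 < t then
            List.replicate t.toNat '\t' ++
              List.replicate ((j : Int) - PySem.Int.floordiv (j : Int) w * w).toNat ' '
          else List.replicate (j - i) ' '
        else List.replicate (j - i) ' '
      piece ++ pvBRuns w all_spaces fuel rest j
    else
      let ns := List.takeWhile (· ≠ ' ') cs
      let rest := List.dropWhile (· ≠ ' ') cs
      (c :: ns) ++ pvBRuns w all_spaces fuel rest (i + 1 + ns.length)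

def unexpand_line_py_alt (line : String) (tab_width : Int) (all_spaces : Bool) : String :=
  if line.toList = [] then line
  else
    String.mk (pvBRuns (if tab_width < 0 then -tab_width else tab_width) all_spaces line.toList.length line.toList 0)

-- ===== PRECONDITION & SPEC =====
-- A raises ZeroDivisionError iff tab_width == 0 and the line contains at least one space.
def Pre_unexpand_line_py (line : String) (tab_width : Int) (all_spaces : Bool) : Prop :=
  tab_width ≠ 0 ∨ (' ' : Char) ∉ line.toList
instance (line : String) (tab_width : Int) (all_spaces : Bool) : Decidable (Pre_unexpand_line_py line tab_width all_spaces) := by unfold Pre_unexpand_line_py; infer_instance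

def pvWitness_unexpand_line_py : String × Int × Bool := ("  a b", 4, false)

-- A raises ZeroDivisionError when tab_width == 0 and the line contains a space; B still returns
-- the line's spaces untouched when no space run is convertible (line not starting with a space,
-- all_spaces false).
def Raises_unexpand_line_py (line : String) (tab_width : Int) (all_spaces : Bool) : Prop :=
  tab_width = 0 ∧ (' ' : Char) ∈ line.toList ∧ all_spaces = false ∧ line.toList.head? ≠ some ' '
instance (line : String) (tab_width : Int) (all_spaces : Bool) : Decidable (Raises_unexpand_line_py line tab_width all_spaces) := by unfold Raises_unexpand_line_py; infer_instance
def pvRaiseWitness_unexpand_line_py : String × Int × Bool := ("x y", 0, false)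
def pvRaiseWitnessOut_unexpand_line_py : String := "x y"

def Spec_unexpand_line_py (line : String) (tab_width : Int) (all_spaces : Bool) (out : String) : Prop := out = unexpand_line_py_alt line tab_width all_spaces
instance (line : String) (tab_width : Int) (all_spaces : Bool) (out : String) : Decidable (Spec_unexpand_line_py line tab_width all_spaces out) := by unfold Spec_unexpand_line_py; infer_instance

-- ===== CLAIM (what is proved, stated in full; the proofs are below) =====
def Claim_equal_unexpand_line_py : Prop := ∀ (line : String) (tab_width : Int) (all_spaces : Bool), Dom_unexpand_line_py line tab_width all_spaces → Pre_unexpand_line_py line tab_width all_spaces → Spec_unexpand_line_py line tab_width all_spaces (unexpand_line_py line tab_width all_spaces)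
def Claim_raises_unexpand_line_py : Prop := (∀ (line : String) (tab_width : Int) (all_spaces : Bool), Dom_unexpand_line_py line tab_width all_spaces → Raises_unexpand_line_py line tab_width all_spaces → ¬ Pre_unexpand_line_py line tab_width all_spaces) ∧ (Dom_unexpand_line_py (pvRaiseWitness_unexpand_line_py.1) (pvRaiseWitness_unexpand_line_py.2.1) (pvRaiseWitness_unexpand_line_py.2.2) ∧ Raises_unexpand_line_py (pvRaiseWitness_unexpand_line_py.1) (pvRaiseWitness_unexpand_line_py.2.1) (pvRaiseWitness_unexpand_line_py.2.2) ∧ unexpand_line_py_alt (pvRaiseWitness_unexpand_line_py.1) (pvRaiseWitness_unexpand_line_py.2.1) (pvRaiseWitness_unexpand_line_py.2.2) = pvRaiseWitnessOut_unexpand_line_py)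

-- ===== LEMMAS AND PROOFS =====

-- abbreviation used only by the proofs
def pvSpaces (n : Nat) : List Char := List.replicate n ' '

-- the tab-stop test is divisibility by |tab_width| (tab_width ≠ 0)
theorem pvModZero (tw : Int) (htw : tw ≠ 0) (m : Nat) :
    (PySem.Int.mod (m : Int) tw = 0) ↔ tw.natAbs ∣ m := by
  rw [PySem.Int.mod_eq_zero_iff_dvd]
  rw [← Int.natAbs_dvd]
  exact_mod_cast Int.natCast_dvd_natCast.symm

-- A over a block of spaces: closed form (existential in the exact split acc/sc)
theorem pvSL (tw : Int) (allSp : Bool) (htw : tw ≠ 0)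
    (k : Nat) : ∀ (acc : List Char) (sc col : Nat) (lead : Bool),
    ∃ A' S', List.foldl (pvAStep tw allSp) (acc, sc, col, lead) (pvSpaces k)
        = (A', S', col + k, lead) ∧
      A' ++ pvSpaces S' =
        acc ++ (if (lead || allSp) = true ∧ col / tw.natAbs < (col + k) / tw.natAbs then
            List.replicate ((col + k) / tw.natAbs - col / tw.natAbs) '\t'
              ++ pvSpaces ((col + k) % tw.natAbs)
          else pvSpaces (sc + k)) := by
  induction k with
  | zero =>
    intro acc sc col lead
    refine ⟨acc, sc, ?_, ?_⟩
    · simp [pvSpaces]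
    · simp [pvSpaces]
  | succ k ih =>
    intro acc sc col lead
    have hw : 0 < tw.natAbs := Int.natAbs_pos.mpr htw
    have hcons : pvSpaces (k + 1) = ' ' :: pvSpaces k := rfl
    rw [hcons, List.foldl_cons]
    by_cases hd : tw.natAbs ∣ (col + 1)
    · have hmod : PySem.Int.mod ((col : Int) + 1) tw = 0 := by
        have := (pvModZero tw htw (col + 1)).mpr hd; push_cast at this; exact this
      have hdiv : (col + 1) / tw.natAbs = col / tw.natAbs + 1 := by
        rw [Nat.succ_div, if_pos hd]
      by_cases hconv : (lead || allSp) = true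
      · -- a tab is emitted
        have hstep : pvAStep tw allSp (acc, sc, col, lead) ' '
            = (acc ++ ['\t'], 0, col + 1, lead) := by
          simp [pvAStep, hmod, hconv]
        rw [hstep]
        obtain ⟨A', S', h1, h2⟩ := ih (acc ++ ['\t']) 0 (col + 1) lead
        have hc13 : col + 1 + k = col + (k + 1) := by omega
        refine ⟨A', S', by rw [h1, hc13], ?_⟩
        rw [h2]
        have hsum : col + (k + 1) = col + 1 + k := by omega
        rw [hsum]
        by_cases ht' : (col + 1) / tw.natAbs < (col + 1 + k) / tw.natAbs
        · rw [if_pos ⟨hconv, ht'⟩, if_pos ⟨hconv, by omega⟩]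
          have : (col + 1 + k) / tw.natAbs - col / tw.natAbs
              = ((col + 1 + k) / tw.natAbs - (col + 1) / tw.natAbs) + 1 := by omega
          rw [this]
          simp [List.replicate_succ, List.append_assoc]
        · -- no further stop inside the remaining k spaces
          obtain ⟨m, hm⟩ := hd
          have hdle : (col + 1) / tw.natAbs ≤ (col + 1 + k) / tw.natAbs :=
            Nat.div_le_div_right (by omega)
          have heq : (col + 1 + k) / tw.natAbs = (col + 1) / tw.natAbs := by omega
          have h3 : (col + 1 + k) / tw.natAbs = m + k / tw.natAbs := by
            rw [hm]; exact Nat.mul_add_div hw m k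
          have h4 : (col + 1) / tw.natAbs = m := by
            rw [hm]; exact Nat.mul_div_cancel_left m hw
          have hkdiv : k / tw.natAbs = 0 := by omega
          have hklt : k < tw.natAbs := by
            by_contra h
            have h5 : tw.natAbs / tw.natAbs ≤ k / tw.natAbs := Nat.div_le_div_right (by omega)
            rw [Nat.div_self hw] at h5; omega
          have hmodk : (col + 1 + k) % tw.natAbs = k := by
            rw [hm, Nat.mul_add_mod, Nat.mod_eq_of_lt hklt]
          rw [if_neg (by rintro ⟨-, h⟩; omega), if_pos ⟨hconv, by omega⟩, hmodk]
          have hone : (col + 1 + k) / tw.natAbs - col / tw.natAbs = 1 := by omega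
          rw [hone]
          simp [pvSpaces]
      · -- run is not convertible: pending spaces are flushed at the stop
        have hstep : pvAStep tw allSp (acc, sc, col, lead) ' '
            = (acc ++ List.replicate (sc + 1) ' ', 0, col + 1, lead) := by
          simp [pvAStep, hmod, hconv]
        rw [hstep]
        obtain ⟨A', S', h1, h2⟩ := ih (acc ++ List.replicate (sc + 1) ' ') 0 (col + 1) lead
        have hc13 : col + 1 + k = col + (k + 1) := by omega
        refine ⟨A', S', by rw [h1, hc13], ?_⟩
        rw [h2, if_neg (by rintro ⟨h, -⟩; exact hconv h), if_neg (by rintro ⟨h, -⟩; exact hconv h)]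
        simp only [pvSpaces, List.append_assoc, ← List.replicate_add]
        congr 2
        omega
    · have hmod : ¬ PySem.Int.mod ((col : Int) + 1) tw = 0 := by
        intro h
        refine hd ((pvModZero tw htw (col + 1)).mp ?_)
        push_cast; exact h
      have hdiv : (col + 1) / tw.natAbs = col / tw.natAbs := by
        rw [Nat.succ_div, if_neg hd]
        omega
      have hstep : pvAStep tw allSp (acc, sc, col, lead) ' '
          = (acc, sc + 1, col + 1, lead) := by
        simp [pvAStep, hmod]
      rw [hstep]
      obtain ⟨A', S', h1, h2⟩ := ih acc (sc + 1) (col + 1) lead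
      have hc13 : col + 1 + k = col + (k + 1) := by omega
      have hsc : sc + 1 + k = sc + (k + 1) := by omega
      refine ⟨A', S', by rw [h1, hc13], ?_⟩
      rw [h2, hc13, hdiv, hsc]

-- A over a block of non-spaces starting with sc = 0
theorem pvNL (tw : Int) (allSp : Bool) (ns : List Char) :
    ∀ (acc : List Char) (col : Nat) (lead : Bool), (∀ c ∈ ns, c ≠ ' ') →
    List.foldl (pvAStep tw allSp) (acc, 0, col, lead) ns
      = (acc ++ ns, 0, col + ns.length, if ns.isEmpty then lead else false) := by
  induction ns with
  | nil => intro acc col lead _; simp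
  | cons c t ih =>
    intro acc col lead h
    have hc : c ≠ ' ' := h c (List.mem_cons_self ..)
    simp only [List.foldl_cons]
    have hstep : pvAStep tw allSp (acc, 0, col, lead) c = (acc ++ [c], 0, col + 1, false) := by
      simp [pvAStep, hc]
    rw [hstep, ih (acc ++ [c]) (col + 1) false (fun x hx => h x (List.mem_cons_of_mem _ hx))]
    refine Prod.ext (by simp) (Prod.ext rfl (Prod.ext (by simp; omega) ?_))
    cases t <;> simp

def pvFlush (st : List Char × Nat × Nat × Bool) : List Char := st.1 ++ pvSpaces st.2.1

-- head of dropWhile does not satisfy the predicate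
theorem pvHeadDrop (p : Char → Bool) (l : List Char) (x : Char)
    (h : (List.dropWhile p l).head? = some x) : p x = false := by
  induction l with
  | nil => simp at h
  | cons c t ih =>
    rw [List.dropWhile_cons] at h
    split at h
    · exact ih h
    · simp_all

-- main invariant: A's fold (plus final flush) equals B's run scanner
theorem pvMain (tw : Int) (allSp : Bool) :
    ∀ (n : Nat) (cs acc : List Char) (sc col : Nat) (lead : Bool),
    cs.length ≤ n →
    ((' ' : Char) ∈ cs → tw ≠ 0) →
    (sc ≠ 0 → cs.head? ≠ some ' ') →
    (cs.head? = some ' ' → (lead = true ↔ col = 0)) →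
    pvFlush (List.foldl (pvAStep tw allSp) (acc, sc, col, lead) cs)
      = acc ++ pvSpaces sc ++ pvBRuns (if tw < 0 then -tw else tw) allSp n cs col := by
  intro n
  induction n with
  | zero =>
    intro cs acc sc col lead hlen _ _ _
    have hnil : cs = [] := List.eq_nil_of_length_eq_zero (by omega)
    subst hnil
    simp [pvBRuns, pvFlush]
  | succ n ih =>
    intro cs acc sc col lead hlen hsp hsc hlead
    cases cs with
    | nil => simp [pvBRuns, pvFlush]
    | cons c t =>
      have hwa : (if tw < 0 then -tw else tw) = (tw.natAbs : Int) := by split <;> omega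
      by_cases hc : c = ' '
      · -- a maximal run of spaces
        subst hc
        have htw : tw ≠ 0 := hsp (List.mem_cons_self ..)
        have hw : 0 < tw.natAbs := Int.natAbs_pos.mpr htw
        have hsc0 : sc = 0 := by by_contra h; exact hsc h rfl
        subst hsc0
        have hlead0 : lead = true ↔ col = 0 := hlead rfl
        have hsp' : ∀ b ∈ List.takeWhile (fun x => x = ' ') t, b = ' ' := by
          intro b hb
          simpa using List.mem_takeWhile_imp hb
        set L := (List.takeWhile (fun x => x = ' ') t).length with hL
        set rest := List.dropWhile (fun x => x = ' ') t with hrest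
        have hrepl : List.takeWhile (fun x => x = ' ') t = List.replicate L ' ' :=
          List.eq_replicate_of_mem hsp'
        have hsplit : (' ' :: t : List Char) = pvSpaces (L + 1) ++ rest := by
          rw [pvSpaces, List.replicate_succ, List.cons_append]
          congr 1
          rw [← hrepl]
          exact (List.takeWhile_append_dropWhile).symm
        have hrhead : ∀ x, rest.head? = some x → x ≠ ' ' := by
          intro x hx
          simpa using pvHeadDrop _ _ _ hx
        have hlen' : rest.length ≤ n := by
          have h1 : rest.length ≤ t.length := List.length_dropWhile_le _ _
          simp at hlen
          omega
        obtain ⟨A', S', h1, h2⟩ := pvSL tw allSp htw (L + 1) acc 0 col lead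
        have hfold : List.foldl (pvAStep tw allSp) (acc, 0, col, lead) (' ' :: t)
            = List.foldl (pvAStep tw allSp) (A', S', col + (L + 1), lead) rest := by
          rw [show List.foldl (pvAStep tw allSp) (acc, 0, col, lead) (' ' :: t)
              = List.foldl (pvAStep tw allSp) (acc, 0, col, lead) (pvSpaces (L + 1) ++ rest) from by rw [← hsplit]]
          rw [List.foldl_append, h1]
        rw [hfold,
          ih rest A' S' (col + (L + 1)) lead hlen' (fun _ => htw)
            (fun _ h => hrhead ' ' h rfl)
            (fun h => absurd rfl (hrhead ' ' h))]
        rw [hwa]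
        simp only [pvBRuns, ← hrest, ← hL]
        rw [if_pos trivial]
        simp only [PySem.Int.floordiv_natCast]
        have hj : col + 1 + L = col + (L + 1) := by omega
        rw [hj]
        set j := col + (L + 1) with hjdef
        have hcond : ((lead || allSp) = true) ↔ (col = 0 ∨ allSp = true) := by
          simp [Bool.or_eq_true, hlead0]
        rw [← List.append_assoc, h2]
        by_cases hcv : col = 0 ∨ allSp = true
        · by_cases hstop : col / tw.natAbs < j / tw.natAbs
          · rw [if_pos ⟨hcond.mpr hcv, hstop⟩, if_pos hcv]
            have hpos : (0:Int) < ((j / tw.natAbs : Nat) : Int) - ((col / tw.natAbs : Nat) : Int) := by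
              omega
            rw [if_pos hpos]
            have h3 : (((j / tw.natAbs : Nat) : Int) - ((col / tw.natAbs : Nat) : Int)).toNat
                = j / tw.natAbs - col / tw.natAbs := by omega
            have h4 : (((j : Nat) : Int) - ((j / tw.natAbs : Nat) : Int) * ((tw.natAbs : Nat) : Int)).toNat
                = j % tw.natAbs := by
              rw [mul_comm]
              have := Nat.div_add_mod j tw.natAbs
              omega
            rw [h3, h4]
            simp [pvSpaces, List.append_assoc]
          · rw [if_neg (by rintro ⟨-, h⟩; exact hstop h), if_pos hcv,
              if_neg (by omega : ¬ (0:Int) < ((j / tw.natAbs : Nat) : Int) - ((col / tw.natAbs : Nat) : Int))]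
            have hcnt : j - col = L + 1 := by omega
            simp [pvSpaces, hcnt, List.append_assoc]
        · rw [if_neg (fun h => hcv (hcond.mp h.1)), if_neg hcv]
          have hcnt : j - col = L + 1 := by omega
          simp [pvSpaces, hcnt, List.append_assoc]
      · -- a maximal run of non-spaces
        have hstep : pvAStep tw allSp (acc, sc, col, lead) c
            = (acc ++ pvSpaces sc ++ [c], 0, col + 1, false) := by
          rcases Nat.eq_zero_or_pos sc with h | h
          · simp [pvAStep, hc, pvSpaces, h]
          · simp [pvAStep, hc, pvSpaces, h]
        have hns : ∀ x ∈ List.takeWhile (fun x => x ≠ ' ') t, x ≠ ' ' := by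
          intro x hx
          simpa using List.mem_takeWhile_imp hx
        set ns := List.takeWhile (fun x => x ≠ ' ') t with hnsdef
        set rest := List.dropWhile (fun x => x ≠ ' ') t with hrestdef
        have hsplit : t = ns ++ rest := (List.takeWhile_append_dropWhile).symm
        have hrhead : ∀ x, rest.head? = some x → x = ' ' := by
          intro x hx
          simpa using pvHeadDrop _ _ _ hx
        have hlen' : rest.length ≤ n := by
          have h1 : rest.length ≤ t.length := List.length_dropWhile_le _ _
          simp at hlen
          omega
        have hfold : List.foldl (pvAStep tw allSp) (acc, sc, col, lead) (c :: t)
            = List.foldl (pvAStep tw allSp)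
                (acc ++ pvSpaces sc ++ [c] ++ ns, 0, col + 1 + ns.length, false) rest := by
          rw [List.foldl_cons, hstep, show t = ns ++ rest from hsplit, List.foldl_append,
            pvNL tw allSp ns _ _ _ hns]
          cases hempty : ns.isEmpty <;> simp
        rw [hfold,
          ih rest (acc ++ pvSpaces sc ++ [c] ++ ns) 0 (col + 1 + ns.length) false hlen'
            (fun h => hsp (List.mem_cons_of_mem _ ((List.dropWhile_sublist _).subset h)))
            (fun h => absurd rfl h)
            (fun _ => ⟨fun h => by simp at h, fun h => by omega⟩)]
        simp only [pvBRuns, ← hnsdef, ← hrestdef]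
        rw [if_neg hc]
        simp [pvSpaces, List.append_assoc]

-- ===== VERDICT (by name: the statement is the Claim_ definition above) =====
theorem unexpand_line_py_spec : Claim_equal_unexpand_line_py := by
  intro line tw allSp _ hpre
  unfold Spec_unexpand_line_py unexpand_line_py unexpand_line_py_alt
  by_cases h : line.toList = []
  · simp [h]
  · simp only [if_neg h]
    congr 1
    have := pvMain tw allSp line.toList.length line.toList [] 0 0 true (le_refl _)
      (fun hsp => by
        rcases hpre with h1 | h2
        · exact h1
        · exact absurd hsp h2)
      (by simp) (by simp)
    have hfl : ∀ st : List Char × Nat × Nat × Bool,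
        (if st.2.1 > 0 then st.1 ++ List.replicate st.2.1 ' ' else st.1) = pvFlush st := by
      intro ⟨a, s, c, l⟩
      by_cases hs : s > 0 <;> simp [pvFlush, pvSpaces, *]
      omega
    rw [hfl]
    rw [this]
    simp [pvSpaces]

def unexpand_line_py_raises : Claim_raises_unexpand_line_py := by
  unfold Claim_raises_unexpand_line_py
  refine ⟨?_, by decide⟩
  intro line tw allSp _ hr hpre
  rcases hpre with h | h
  · exact h hr.1
  · exact h hr.2.1
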